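-- pv_equiv track=rewrite | github.com/xiaohai5/agent | backend/app/graphs/chat_graph.py | _merge_plan_draft
-- ===== SOURCE A (Python) =====
-- from typing import Any, Literal, TypedDict
--
-- def _merge_plan_draft(
--     base_draft: dict[str, Any],
--     updates: dict[str, Any],
--     removed_fields: list[str],
--     locked_fields: dict[str, Any],
-- ) -> dict[str, Any]:
--     draft = dict(base_draft or {})
--     for field_name in removed_fields:
--         draft.pop(field_name, None)
--     for field_name, value in (updates or {}).items():
--         if field_name in locked_fields and locked_fields.get(field_name) == value:
--             continue
--         draft[field_name] = value
--     return draft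
-- ===== SOURCE B (Python) =====
-- def _merge_plan_draft(base_draft, updates, removed_fields, locked_fields):
--     removed = set(removed_fields)
--     ups = dict(updates or {})
--
--     def locked(k, v):
--         return k in locked_fields and locked_fields.get(k) == v
--
--     head = [(k, ups[k] if k in ups and not locked(k, ups[k]) else v)
--             for k, v in (base_draft or {}).items() if k not in removed]
--     head_keys = {k for k, _ in head}
--     tail = [(k, v) for k, v in ups.items() if k not in head_keys and not locked(k, v)]
--     return dict(head + tail)
-- ===== Notes on version B (the rewrite author's own statement) =====
-- stated objective: alternative
-- what changed: Instead of mutating a copied dict in two passes, B computes the result positionally in one construction: each surviving base entry is emitted once with its final value (the update applied in place unless locked), and only the genuinely new, unlocked update keys are appended as a tail; no dict is ever mutated or overlaid.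
import Mathlib
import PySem

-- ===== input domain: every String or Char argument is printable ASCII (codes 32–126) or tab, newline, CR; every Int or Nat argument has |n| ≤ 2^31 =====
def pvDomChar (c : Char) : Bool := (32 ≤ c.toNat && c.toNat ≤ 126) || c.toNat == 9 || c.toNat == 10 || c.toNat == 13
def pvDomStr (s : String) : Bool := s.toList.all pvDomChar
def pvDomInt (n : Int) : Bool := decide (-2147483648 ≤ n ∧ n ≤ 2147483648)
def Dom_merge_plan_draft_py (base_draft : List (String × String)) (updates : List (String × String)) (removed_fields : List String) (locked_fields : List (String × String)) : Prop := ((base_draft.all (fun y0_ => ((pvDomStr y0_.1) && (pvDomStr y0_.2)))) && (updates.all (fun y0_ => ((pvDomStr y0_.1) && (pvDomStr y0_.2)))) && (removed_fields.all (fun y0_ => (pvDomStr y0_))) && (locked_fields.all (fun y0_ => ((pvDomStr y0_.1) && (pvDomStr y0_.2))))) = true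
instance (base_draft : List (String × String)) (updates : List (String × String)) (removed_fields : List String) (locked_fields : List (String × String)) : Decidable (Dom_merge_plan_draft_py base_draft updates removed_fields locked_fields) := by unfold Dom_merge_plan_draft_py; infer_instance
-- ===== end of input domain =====

-- B builds the merged dict positionally in one construction (surviving base entries with their
-- final value, then the genuinely new unlocked updates appended) instead of A's two mutating
-- passes over a copied dict; objective: alternative.


-- ===== PORT A =====
-- draft = dict(base_draft or {}); pop each removed field; then insert each update unless locked at the same value.
def merge_plan_draft_py (base_draft : List (String × String)) (updates : List (String × String)) (removed_fields : List String) (locked_fields : List (String × String)) : List (String × String) :=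
  let draft0 : PySem.Dict String String := PySem.Dict.ofList base_draft
  let draft1 := removed_fields.foldl (fun d k => d.erase k) draft0
  let lockedD : PySem.Dict String String := PySem.Dict.ofList locked_fields
  let final := (PySem.Dict.ofList updates).items.foldl
    (fun d p =>
      if lockedD.contains p.1 && (lockedD.get? p.1 == some p.2) then d
      else d.insert p.1 p.2) draft1
  final.items

-- ===== PORT B =====
-- head = surviving base entries with their final value computed in place; tail = new unlocked
-- updates; result = dict(head + tail). No dict is mutated or overlaid.
def merge_plan_draft_py_alt (base_draft : List (String × String)) (updates : List (String × String)) (removed_fields : List String) (locked_fields : List (String × String)) : List (String × String) :=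
  let removed : PySem.Set String := PySem.Set.ofList removed_fields
  let ups : PySem.Dict String String := PySem.Dict.ofList updates
  let lockedD : PySem.Dict String String := PySem.Dict.ofList locked_fields
  let locked : String → String → Bool := fun k v => lockedD.contains k && (lockedD.get? k == some v)
  let head : List (String × String) :=
    ((PySem.Dict.ofList base_draft).items.filter (fun p => !removed.contains p.1)).map
      (fun p => (p.1, match ups.get? p.1 with
                      | some w => if !locked p.1 w then w else p.2
                      | none => p.2))
  let headKeys : PySem.Set String := PySem.Set.ofList (head.map Prod.fst)
  let tail : List (String × String) :=
    ups.items.filter (fun p => !headKeys.contains p.1 && !locked p.1 p.2)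
  (PySem.Dict.ofList (head ++ tail)).items

-- ===== PRECONDITION & SPEC =====
def Spec_merge_plan_draft_py (base_draft : List (String × String)) (updates : List (String × String)) (removed_fields : List String) (locked_fields : List (String × String)) (out : List (String × String)) : Prop := out = merge_plan_draft_py_alt base_draft updates removed_fields locked_fields
instance (base_draft : List (String × String)) (updates : List (String × String)) (removed_fields : List String) (locked_fields : List (String × String)) (out : List (String × String)) : Decidable (Spec_merge_plan_draft_py base_draft updates removed_fields locked_fields out) := by unfold Spec_merge_plan_draft_py; infer_instance

-- ===== CLAIM (what is proved, stated in full; the proofs are below) =====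
def Claim_equal_merge_plan_draft_py : Prop := ∀ (base_draft : List (String × String)) (updates : List (String × String)) (removed_fields : List String) (locked_fields : List (String × String)), Dom_merge_plan_draft_py base_draft updates removed_fields locked_fields → Spec_merge_plan_draft_py base_draft updates removed_fields locked_fields (merge_plan_draft_py base_draft updates removed_fields locked_fields)

-- ===== LEMMAS AND PROOFS =====

-- Folding erase over a key list filters the items by non-membership.
theorem foldl_erase_eq_filter (rs : List String) (d : PySem.Dict String String) :
    rs.foldl (fun d k => d.erase k) d
      = PySem.Dict.mk (d.items.filter (fun p => !rs.contains p.1)) := by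
  induction rs generalizing d with
  | nil => simp
  | cons r rs ih =>
      rw [List.foldl_cons, ih (d.erase r)]
      simp only [PySem.Dict.erase, List.filter_filter]
      congr 1
      apply List.filter_congr
      intro p _
      simp [Bool.and_comm, beq_eq_decide]

-- A's skip-if loop is the insert loop over the filtered list.
theorem foldl_skip_eq_foldl_filter (c : String × String → Bool)
    (l : List (String × String)) (d : PySem.Dict String String) :
    l.foldl (fun d p => if c p then d else d.insert p.1 p.2) d
      = (l.filter (fun p => !c p)).foldl (fun d p => d.insert p.1 p.2) d := by
  induction l generalizing d with
  | nil => rfl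
  | cons p l ih => by_cases h : c p <;> simp [h, ih]

-- ofList of a key-distinct list is the literal dict.
theorem ofList_of_nodup (l : List (String × String)) (hn : (l.map Prod.fst).Nodup) :
    PySem.Dict.ofList l = PySem.Dict.mk l := by
  apply PySem.Dict.ext
  have := PySem.Dict.items_foldl_insert_fresh l Prod.fst Prod.snd PySem.Dict.empty
    (by intro p _; rfl) hn
  simpa [PySem.Dict.ofList, PySem.Dict.update, PySem.Dict.empty] using this

theorem nodup_keys_filter (l : List (String × String)) (c : String × String → Bool)
    (hn : (l.map Prod.fst).Nodup) : ((l.filter c).map Prod.fst).Nodup :=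
  hn.sublist (List.Sublist.map Prod.fst List.filter_sublist)

-- Set.ofList membership test agrees with List.contains.
theorem set_contains_eq (rs : List String) (x : String) :
    (PySem.Set.ofList rs).contains x = rs.contains x := by
  by_cases h : x ∈ rs
  · simp [h, (PySem.Set.mem_ofList rs x).2 h]
  · have : x ∉ PySem.Set.ofList rs := fun hc => h ((PySem.Set.mem_ofList rs x).1 hc)
    simp [h, this]

-- find? for a key in a key-distinct list, after filtering by a side condition.
theorem find?_filter_of_nodup (u : List (String × String)) (c : String × String → Bool)
    (x : String) (hu : (u.map Prod.fst).Nodup) :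
    (u.filter (fun p => !c p)).find? (fun p => p.1 == x)
      = match u.find? (fun p => p.1 == x) with
        | some p => if c p then none else some p
        | none => none := by
  induction u with
  | nil => rfl
  | cons q u ih =>
      simp only [List.map_cons, List.nodup_cons] at hu
      by_cases hx : q.1 = x
      · have hnone : (u.filter (fun p => !c p)).find? (fun p => p.1 == x) = none := by
          apply List.find?_eq_none.2
          intro p hp
          simp only [beq_iff_eq]
          intro he
          exact hu.1 (by rw [hx, ← he]; exact List.mem_map_of_mem (List.mem_of_mem_filter hp))
        by_cases hc : c q
        · simp [hc, hnone, hx]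
        · simp [hc, hx]
      · have hq : (q.1 == x) = false := by simp [hx]
        by_cases hc : c q
        · simp [hc, hq, ih hu.2]
        · simp [hc, hq, ih hu.2]

-- The insert loop over a key-distinct list: in-place final values for present keys, fresh keys appended.
theorem foldl_insert_items (l m : List (String × String))
    (hl : (l.map Prod.fst).Nodup) (hm : (m.map Prod.fst).Nodup) :
    (l.foldl (fun d p => d.insert p.1 p.2) (PySem.Dict.mk m)).items
      = m.map (fun q => (q.1, (((l.find? (fun p => p.1 == q.1)).map Prod.snd).getD q.2)))
        ++ l.filter (fun p => !(m.map Prod.fst).contains p.1) := by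
  induction l generalizing m with
  | nil => simp
  | cons p l ih =>
      simp only [List.map_cons, List.nodup_cons] at hl
      rw [List.foldl_cons]
      by_cases hcont : (PySem.Dict.mk m).contains p.1
      · have hkm : p.1 ∈ m.map Prod.fst := by
          simp only [PySem.Dict.contains, List.any_eq_true] at hcont
          obtain ⟨q, hq, he⟩ := hcont
          exact (beq_iff_eq.1 he) ▸ List.mem_map_of_mem hq
        have hins : (PySem.Dict.mk m).insert p.1 p.2
            = PySem.Dict.mk (m.map (fun q => if q.1 == p.1 then (p.1, p.2) else q)) := by
          simp [PySem.Dict.insert, hcont]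
        set m' := m.map (fun q => if q.1 == p.1 then (p.1, p.2) else q) with hm'
        have hkeys : m'.map Prod.fst = m.map Prod.fst := by
          simp only [hm', List.map_map]
          apply List.map_congr_left
          intro q _
          by_cases h : q.1 = p.1 <;> simp [h]
        rw [hins, ih m' hl.2 (by rw [hkeys]; exact hm)]
        have hfl : l.find? (fun q => q.1 == p.1) = none := by
          apply List.find?_eq_none.2
          intro q hq
          simp only [beq_iff_eq]
          exact fun he => hl.1 (he ▸ List.mem_map_of_mem hq)
        have hmap : m'.map (fun q => (q.1, (((l.find? (fun r => r.1 == q.1)).map Prod.snd).getD q.2)))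
            = m.map (fun q => (q.1, ((((p :: l).find? (fun r => r.1 == q.1)).map Prod.snd).getD q.2))) := by
          simp only [hm', List.map_map]
          apply List.map_congr_left
          intro q _
          by_cases h : q.1 = p.1
          · simp [h, hfl]
          · have h1 : (q.1 == p.1) = false := by simp [h]
            have h2 : (p.1 == q.1) = false := by
              simp only [beq_eq_false_iff_ne]; exact fun he => h he.symm
            simp [h2, h]
        rw [hmap, hkeys]
        have hfilt : (p :: l).filter (fun q => !(m.map Prod.fst).contains q.1)
            = l.filter (fun q => !(m.map Prod.fst).contains q.1) := by
          rw [List.filter_cons]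
          simp only [List.contains_eq_mem, List.mem_map] at *
          obtain ⟨⟨k, v⟩, hq, he⟩ := hkm
          have hx : ∃ a ∈ m, a.1 = p.1 := ⟨(k, v), hq, he⟩
          simp [hx]
        rw [hfilt]
      · have hkm : p.1 ∉ m.map Prod.fst := by
          intro hmem
          apply hcont
          simp only [PySem.Dict.contains, List.any_eq_true]
          obtain ⟨q, hq, he⟩ := List.mem_map.1 hmem
          exact ⟨q, hq, by simp [he]⟩
        have hins : (PySem.Dict.mk m).insert p.1 p.2 = PySem.Dict.mk (m ++ [p]) := by
          simp only [Bool.not_eq_true] at hcont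
          simp [PySem.Dict.insert, hcont]
        have hm2 : ((m ++ [p]).map Prod.fst).Nodup := by
          simp only [List.map_append, List.map_cons, List.map_nil]
          exact List.Nodup.append hm (List.nodup_singleton _)
            (fun a ha hb => hkm ((List.mem_singleton.1 hb) ▸ ha))
        rw [hins, ih (m ++ [p]) hl.2 hm2]
        have hfl : l.find? (fun q => q.1 == p.1) = none := by
          apply List.find?_eq_none.2
          intro q hq
          simp only [beq_iff_eq]
          exact fun he => hl.1 (he ▸ List.mem_map_of_mem hq)
        have hmap : m.map (fun q => (q.1, (((l.find? (fun r => r.1 == q.1)).map Prod.snd).getD q.2)))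
            = m.map (fun q => (q.1, ((((p :: l).find? (fun r => r.1 == q.1)).map Prod.snd).getD q.2))) := by
          apply List.map_congr_left
          intro q hq
          have h : q.1 ≠ p.1 := fun he => hkm (he ▸ List.mem_map_of_mem hq)
          have h2 : (p.1 == q.1) = false := by
            simp only [beq_eq_false_iff_ne]; exact fun he => h he.symm
          simp [h2]
        have hfilt2 : l.filter (fun q => !((m ++ [p]).map Prod.fst).contains q.1)
            = l.filter (fun q => !(m.map Prod.fst).contains q.1) := by
          apply List.filter_congr
          intro q hq
          have h : q.1 ≠ p.1 := fun he => hl.1 (he ▸ List.mem_map_of_mem hq)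
          simp [h]
        rw [hfilt2, List.map_append, hmap]
        simp only [List.map_cons, List.map_nil, List.find?_cons, List.filter_cons]
        have : ((m.map Prod.fst).contains p.1) = false := by
          simpa [List.contains_iff_mem] using hkm
        simp only [this, Bool.not_false, if_pos]
        simp [hfl]

-- ===== VERDICT (by name: the statement is the Claim_ definition above) =====
theorem merge_plan_draft_py_spec : Claim_equal_merge_plan_draft_py := by
  intro base updates removed locked _
  unfold Spec_merge_plan_draft_py merge_plan_draft_py merge_plan_draft_py_alt
  simp only []
  have hbase : ((PySem.Dict.ofList base).items.map Prod.fst).Nodup := by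
    simpa [PySem.Dict.keys] using PySem.Dict.nodup_keys_ofList (κ := String) (ν := String) base
  have hups : ((PySem.Dict.ofList (κ := String) (ν := String) updates).items.map Prod.fst).Nodup := by
    simpa [PySem.Dict.keys] using PySem.Dict.nodup_keys_ofList (κ := String) (ν := String) updates
  set lockedD := PySem.Dict.ofList locked with hlockedD
  set baseI := (PySem.Dict.ofList base).items with hbaseI
  set upsI := (PySem.Dict.ofList (κ := String) (ν := String) updates).items with hupsI
  set c : String × String → Bool :=
    fun p => lockedD.contains p.1 && (lockedD.get? p.1 == some p.2) with hc
  set kept := baseI.filter (fun p => !removed.contains p.1) with hkeptdef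
  set ups' := upsI.filter (fun p => !c p) with hups'
  have hkeptN : (kept.map Prod.fst).Nodup := nodup_keys_filter _ _ hbase
  have hupsN : (ups'.map Prod.fst).Nodup := nodup_keys_filter _ _ hups
  -- the value function B computes for each kept entry
  set f : String × String → String × String :=
    fun p => (p.1, match (PySem.Dict.ofList updates).get? p.1 with
                   | some w => if !(lockedD.contains p.1 && (lockedD.get? p.1 == some w)) then w
                               else p.2
                   | none => p.2) with hf
  -- rewrite A's side into map ++ filter form
  have hkeptS : baseI.filter (fun p => !(PySem.Set.ofList removed).contains p.1) = kept := by
    apply List.filter_congr; intro p _; rw [set_contains_eq]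
  have hA : (ups'.foldl (fun d p => d.insert p.1 p.2) (PySem.Dict.mk kept)).items
      = kept.map (fun q => (q.1, (((ups'.find? (fun p => p.1 == q.1)).map Prod.snd).getD q.2)))
        ++ ups'.filter (fun p => !(kept.map Prod.fst).contains p.1) :=
    foldl_insert_items ups' kept hupsN hkeptN
  -- B's head equals A's map part
  have hhead : kept.map f
      = kept.map (fun q => (q.1, (((ups'.find? (fun p => p.1 == q.1)).map Prod.snd).getD q.2))) := by
    apply List.map_congr_left
    intro q _
    rw [hups', find?_filter_of_nodup upsI c q.1 hups]
    have hg : (PySem.Dict.ofList updates).get? q.1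
        = (upsI.find? (fun p => p.1 == q.1)).map (fun x => x.2) := rfl
    simp only [hf]
    rw [hg]
    cases hfind : upsI.find? (fun p => p.1 == q.1) with
    | none => simp
    | some w =>
        obtain ⟨k, v⟩ := w
        have hw : k = q.1 := by
          have := List.find?_some hfind
          simpa using this
        subst hw
        by_cases hcb : c (q.1, v)
        · simp only [hc] at hcb
          simp [hcb, hc]
        · simp only [hc] at hcb
          simp [hcb, hc]
  have hheadkeys : (kept.map f).map Prod.fst = kept.map Prod.fst := by
    simp only [List.map_map]
    apply List.map_congr_left
    intro q _
    rfl
  -- B's tail equals A's filter part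
  have htail : upsI.filter
        (fun p => !(PySem.Set.ofList ((kept.map f).map Prod.fst)).contains p.1 && !c p)
      = ups'.filter (fun p => !(kept.map Prod.fst).contains p.1) := by
    rw [hups', List.filter_filter]
    apply List.filter_congr
    intro p _
    rw [hheadkeys, set_contains_eq]
  -- B's dict wrapper is the identity: the concatenation has distinct keys
  have hnodup : (((kept.map f) ++ upsI.filter
        (fun p => !(PySem.Set.ofList ((kept.map f).map Prod.fst)).contains p.1 && !c p)).map
          Prod.fst).Nodup := by
    rw [htail, List.map_append, hheadkeys]
    apply List.Nodup.append hkeptN (nodup_keys_filter _ _ hupsN)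
    intro a ha hb
    obtain ⟨p, hp, he⟩ := List.mem_map.1 hb
    have := List.of_mem_filter hp
    rw [he] at this
    simp only [Bool.not_eq_eq_eq_not, Bool.not_true, List.contains_eq_mem,
      decide_eq_false_iff_not] at this
    exact this ha
  have hB : (PySem.Dict.ofList ((kept.map f) ++ upsI.filter
        (fun p => !(PySem.Set.ofList ((kept.map f).map Prod.fst)).contains p.1 && !c p))).items
      = (kept.map f) ++ upsI.filter
        (fun p => !(PySem.Set.ofList ((kept.map f).map Prod.fst)).contains p.1 && !c p) := by
    rw [ofList_of_nodup _ hnodup]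
  rw [foldl_erase_eq_filter, foldl_skip_eq_foldl_filter c, hkeptS, hA, hB, htail, hhead]
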